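-- pv_equiv track=rewrite | github.com/arr10/AI_SWE | testcases/correct_8.py | correct_8
-- ===== SOURCE A (Python) =====
-- def correct_8(seed):
--     """
--     Generate a self-replicating string based on a given seed string.
--
--     Parameters:
--     - seed (str): The input seed string.
--
--     Returns:
--     - str: The self-replicating string.
--     """
--     replicator = ""
--
--     for char in seed:
--         # Convert each character to its ASCII code
--         ascii_code = ord(char)
--
--         # Generate a new character based on the ASCII code
--         new_char = chr(ascii_code + 1)
--
--         # Append the new character to the replicator string
--         replicator += new_char
--
--     # Combine the seed and replicator to create the self-replicating string
--     result = seed + replicator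
--     return result
-- ===== SOURCE B (Python) =====
-- def correct_8(seed):
--     table = {ord(c): ord(c) + 1 for c in seed}
--     return seed + seed.translate(table)
-- ===== Notes on version B (the rewrite author's own statement) =====
-- stated objective: faster
-- what changed: Replaces the explicit per-character string-accumulation loop (replicator += chr(ord(c)+1)) by building a translation table {ord(c): ord(c)+1} once and producing the shifted copy with a single C-level str.translate pass.
import Mathlib
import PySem

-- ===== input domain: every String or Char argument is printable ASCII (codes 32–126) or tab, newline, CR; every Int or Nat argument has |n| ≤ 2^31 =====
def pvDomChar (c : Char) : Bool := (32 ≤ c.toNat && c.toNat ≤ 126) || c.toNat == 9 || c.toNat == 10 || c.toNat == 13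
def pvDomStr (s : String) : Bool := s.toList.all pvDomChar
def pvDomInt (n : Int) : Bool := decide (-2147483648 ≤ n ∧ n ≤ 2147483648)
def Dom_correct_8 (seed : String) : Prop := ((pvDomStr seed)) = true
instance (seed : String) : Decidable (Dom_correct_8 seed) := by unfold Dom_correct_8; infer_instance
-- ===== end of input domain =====

-- B replaces A's per-character accumulation loop by a translation table built once
-- ({ord c: ord c+1}) and one str.translate remap pass (objective: idiomatic).

-- ===== PORT A =====
-- replicator accumulation loop: replicator += chr(ord(char) + 1)
def correct_8 (seed : String) : String :=
  let replicator : List Char :=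
    seed.toList.foldl (fun acc ch => acc ++ [Char.ofNat (ch.toNat + 1)]) []
  String.mk (seed.toList ++ replicator)

-- ===== PORT B =====
-- table = {ord(c): ord(c) + 1 for c in seed}
def pvTable (seed : String) : PySem.Dict Int Int :=
  seed.toList.foldl (fun d c => d.insert (c.toNat : Int) ((c.toNat : Int) + 1)) PySem.Dict.empty
-- seed.translate(table): each char is remapped through the table, kept unchanged if absent
def pvTranslate (s : List Char) (table : PySem.Dict Int Int) : List Char :=
  s.map (fun c => match table.get? (c.toNat : Int) with
                  | some v => Char.ofNat v.toNat
                  | none => c)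
def correct_8_alt (seed : String) : String :=
  String.mk (seed.toList ++ pvTranslate seed.toList (pvTable seed))

-- ===== PRECONDITION & SPEC =====
def Spec_correct_8 (seed : String) (out : String) : Prop := out = correct_8_alt seed
instance (seed : String) (out : String) : Decidable (Spec_correct_8 seed out) := by unfold Spec_correct_8; infer_instance

-- ===== CLAIM (what is proved, stated in full; the proofs are below) =====
def Claim_equal_correct_8 : Prop := ∀ (seed : String), Dom_correct_8 seed → Spec_correct_8 seed (correct_8 seed)

-- ===== LEMMAS AND PROOFS =====

-- lookup in the table built over l: any character of l maps to its code + 1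
theorem pv_lookup_fold (l : List Char) (d : PySem.Dict Int Int) (c : Char)
    (h : c ∈ l ∨ d.get? (c.toNat : Int) = some ((c.toNat : Int) + 1)) :
    (l.foldl (fun d c => d.insert (c.toNat : Int) ((c.toNat : Int) + 1)) d).get? (c.toNat : Int)
      = some ((c.toNat : Int) + 1) := by
  induction l generalizing d with
  | nil => simpa using h
  | cons a l ih =>
    simp only [List.foldl_cons]
    apply ih
    rcases h with h | h
    · rcases List.mem_cons.mp h with rfl | hm
      · right; rw [PySem.Dict.get?_insert]; simp
      · left; exact hm
    · right
      rw [PySem.Dict.get?_insert]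
      split_ifs with he
      · rw [he]
      · exact h

theorem pvTranslate_eq (seed : String) :
    pvTranslate seed.toList (pvTable seed)
      = seed.toList.map (fun ch => Char.ofNat (ch.toNat + 1)) := by
  unfold pvTranslate pvTable
  apply List.map_congr_left
  intro c hc
  rw [pv_lookup_fold seed.toList PySem.Dict.empty c (Or.inl hc)]
  norm_num

-- ===== VERDICT (by name: the statement is the Claim_ definition above) =====
theorem correct_8_spec : Claim_equal_correct_8 := by
  intro seed _
  unfold Spec_correct_8 correct_8 correct_8_alt
  rw [pvTranslate_eq, PySem.List.foldl_append_singleton_eq_map]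
  rfl
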